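-- pv_equiv track=rewrite | github.com/brucekevinadams/Python | MorganAndAString.py | morganAndString
-- ===== SOURCE A (Python) =====
-- def morganAndString(a, b):
--     answer = ''
--     a += '~'
--     b += '~'
--     i = 0
--     j = 0
--     while a[i] != '~' or b[j] != '~':
--         if a[i] != '~' and a[i:] < b[j:]:
--             answer += a[i]
--             i += 1
--         else:
--             answer += b[j]
--             j += 1
--     return answer
-- ===== SOURCE B (Python) =====
-- def morganAndString(a, b):
--     # Suffix-rank precomputation: sort the (distinct) suffixes of both
--     # sentinel-terminated strings once and give each suffix its rank; the
--     # greedy merge then decides every pick by one integer comparison instead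
--     # of slicing out and comparing two suffix strings per output character.
--     A = a + '~'
--     B = b + '~'
--     order = sorted({A[i:] for i in range(len(A))} | {B[j:] for j in range(len(B))})
--     rank = {s: k for k, s in enumerate(order)}
--     ra = [rank[A[i:]] for i in range(len(A))]
--     rb = [rank[B[j:]] for j in range(len(B))]
--     out = []
--     i = 0
--     j = 0
--     while A[i] != '~' or B[j] != '~':
--         if A[i] != '~' and ra[i] < rb[j]:
--             out.append(A[i])
--             i += 1
--         else:
--             out.append(B[j])
--             j += 1
--     return ''.join(out)
-- ===== Notes on version B (the rewrite author's own statement) =====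
-- stated objective: alternative
-- what changed: A compares two freshly sliced suffix strings at every pick of the greedy merge; B precomputes a rank table by sorting the set of all suffixes of both sentinel-terminated strings once, so the merge loop decides each pick by a single integer rank comparison with no slicing, at the price of the up-front suffix sort.
import Mathlib
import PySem

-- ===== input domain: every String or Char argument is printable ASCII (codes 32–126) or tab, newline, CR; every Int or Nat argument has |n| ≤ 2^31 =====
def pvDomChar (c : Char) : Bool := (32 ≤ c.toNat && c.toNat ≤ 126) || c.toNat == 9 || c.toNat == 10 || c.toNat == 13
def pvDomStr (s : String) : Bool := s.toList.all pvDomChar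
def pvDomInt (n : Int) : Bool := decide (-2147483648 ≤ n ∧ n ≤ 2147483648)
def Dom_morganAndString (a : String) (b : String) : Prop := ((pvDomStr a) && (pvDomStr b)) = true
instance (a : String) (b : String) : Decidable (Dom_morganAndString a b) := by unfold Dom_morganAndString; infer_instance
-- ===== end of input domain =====

-- B replaces A's per-pick suffix-slice comparisons by a rank table obtained from one
-- sort of the set of all suffixes, so the merge loop compares integers (alternative
-- algorithm, not measured faster).

-- ===== PORT A =====
-- while a[i] != '~' or b[j] != '~': if a[i] != '~' and a[i:] < b[j:] … (fuel-bounded; on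
-- the stated domain the loop always stops before the fuel runs out)
def pvLoopA (LA LB : List Char) : Nat → Nat → Nat → List Char → List Char
  | 0, _, _, acc => acc
  | fuel+1, i, j, acc =>
    match LA[i]?, LB[j]? with
    | some ca, some cb =>
      if ca ≠ '~' ∨ cb ≠ '~' then
        if ca ≠ '~' ∧ LA.drop i < LB.drop j then
          pvLoopA LA LB fuel (i+1) j (acc ++ [ca])
        else
          pvLoopA LA LB fuel i (j+1) (acc ++ [cb])
      else acc
    | _, _ => acc

def morganAndString (a : String) (b : String) : String :=
  let LA := a.toList ++ ['~']
  let LB := b.toList ++ ['~']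
  String.ofList (pvLoopA LA LB (LA.length + LB.length) 0 0 [])

-- ===== PORT B =====
-- {A[i:] for i in range(len(A))} (a set comprehension over the suffixes, in order of i)
def pvSuffixSet (L : List Char) : PySem.Set (List Char) :=
  PySem.Set.ofList ((List.range L.length).map (fun i => L.drop i))

-- rank = {s: k for k, s in enumerate(order)}
def pvRankDict (order : List (List Char)) : PySem.Dict (List Char) Int :=
  (PySem.List.enumerate order).foldl (fun d p => d.insert p.2 p.1) PySem.Dict.empty

-- ra = [rank[A[i:]] for i in range(len(A))]   (the key is always present, so Python's
-- rank[...] never raises; the .getD 0 default is never taken)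
def pvRanks (rank : PySem.Dict (List Char) Int) (L : List Char) : List Int :=
  (List.range L.length).map (fun i => (rank.get? (L.drop i)).getD 0)

-- the merge loop of Source B: while A[i] != '~' or B[j] != '~': if A[i] != '~' and ra[i] < rb[j] …
-- (list indexing ra[i]/rb[j] is in range whenever reached, so .getD 0 is exact)
def pvLoopB (LA LB : List Char) (ra rb : List Int) : Nat → Nat → Nat → List Char → List Char
  | 0, _, _, acc => acc
  | fuel+1, i, j, acc =>
    match LA[i]?, LB[j]? with
    | some ca, some cb =>
      if ca ≠ '~' ∨ cb ≠ '~' then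
        if ca ≠ '~' ∧ ra.getD i 0 < rb.getD j 0 then
          pvLoopB LA LB ra rb fuel (i+1) j (acc ++ [ca])
        else
          pvLoopB LA LB ra rb fuel i (j+1) (acc ++ [cb])
      else acc
    | _, _ => acc

def morganAndString_alt (a : String) (b : String) : String :=
  let LA := a.toList ++ ['~']
  let LB := b.toList ++ ['~']
  let order := PySem.List.sorted (PySem.Set.union (pvSuffixSet LA) (pvSuffixSet LB)) (fun x => x) false
  let rank := pvRankDict order
  let ra := pvRanks rank LA
  let rb := pvRanks rank LB
  String.ofList (pvLoopB LA LB ra rb (LA.length + LB.length) 0 0 [])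

-- ===== PRECONDITION & SPEC =====
def Spec_morganAndString (a : String) (b : String) (out : String) : Prop := out = morganAndString_alt a b
instance (a : String) (b : String) (out : String) : Decidable (Spec_morganAndString a b out) := by unfold Spec_morganAndString; infer_instance

-- ===== CLAIM =====
def Claim_equal_morganAndString : Prop := ∀ (a : String) (b : String), Dom_morganAndString a b → Spec_morganAndString a b (morganAndString a b)

-- ===== LEMMAS AND PROOFS =====

-- adding elements already present leaves a PySem.Set unchanged
lemma foldl_add_of_subset {s : List (List Char)} (d : PySem.Set (List Char))
    (h : ∀ x ∈ s, x ∈ d) : List.foldl PySem.Set.add d s = d := by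
  induction s generalizing d with
  | nil => rfl
  | cons x t ih =>
    have hadd : PySem.Set.add d x = d := by
      simp [PySem.Set.add, h x List.mem_cons_self]
    simp only [List.foldl_cons, hadd]
    exact ih d (fun y hy => h y (List.mem_cons_of_mem _ hy))

-- a fold of Set.add only appends: the initial set is a prefix of the result
lemma foldl_add_prefix (ys : List (List Char)) :
    ∀ (s : PySem.Set (List Char)), ∃ r, List.foldl PySem.Set.add s ys = s ++ r := by
  induction ys with
  | nil => exact fun s => ⟨[], by simp⟩
  | cons y t ih =>
    intro s
    simp only [List.foldl_cons]
    obtain ⟨r, hr⟩ := ih (PySem.Set.add s y)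
    by_cases hy : y ∈ s
    · exact ⟨r, by simpa [PySem.Set.add, hy] using hr⟩
    · refine ⟨[y] ++ r, ?_⟩
      rw [hr]
      simp [PySem.Set.add, hy]

-- folding Set.add over the deduplicated list equals folding it over the raw list
lemma foldl_add_ofList (ys : List (List Char)) :
    ∀ (s d : PySem.Set (List Char)), (∀ x ∈ s, x ∈ d) →
      List.foldl PySem.Set.add d (List.foldl PySem.Set.add s ys) = List.foldl PySem.Set.add d ys := by
  induction ys with
  | nil => exact fun s d h => foldl_add_of_subset d h
  | cons y t ih =>
    intro s d h
    simp only [List.foldl_cons]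
    by_cases hy : y ∈ s
    · have h1 : PySem.Set.add s y = s := by simp [PySem.Set.add, hy]
      have h2 : PySem.Set.add d y = d := by simp [PySem.Set.add, h y hy]
      rw [h1, h2]
      exact ih s d h
    · have hsub : ∀ x ∈ PySem.Set.add s y, x ∈ PySem.Set.add d y := by
        intro x hx
        rcases (PySem.Set.mem_add s y x).mp hx with hxs | hxy
        · exact (PySem.Set.mem_add d y x).mpr (Or.inl (h x hxs))
        · exact (PySem.Set.mem_add d y x).mpr (Or.inr hxy)
      have hIH := ih (PySem.Set.add s y) (PySem.Set.add d y) hsub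
      rw [← hIH]
      obtain ⟨r, hr⟩ := foldl_add_prefix t (PySem.Set.add s y)
      have hsy : PySem.Set.add s y = s ++ [y] := by simp [PySem.Set.add, hy]
      have haux : y ∈ (if y ∈ d then d else d ++ [y]) := by
        by_cases hk : y ∈ d <;> simp [hk]
      have haddyy : PySem.Set.add (PySem.Set.add d y) y = PySem.Set.add d y := by
        simp [PySem.Set.add, haux]
      have hsubd : ∀ x ∈ s, x ∈ PySem.Set.add d y :=
        fun x hx => (PySem.Set.mem_add d y x).mpr (Or.inl (h x hx))
      rw [hr, hsy]
      rw [List.foldl_append, List.foldl_append, List.foldl_append, List.foldl_append]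
      rw [foldl_add_of_subset d h, foldl_add_of_subset (PySem.Set.add d y) hsubd]
      simp only [List.foldl_cons, List.foldl_nil, haddyy]

-- {…} | {…} over the two suffix enumerations is the set of their concatenation
lemma union_suffixSets (LA LB : List Char) :
    PySem.Set.union (pvSuffixSet LA) (pvSuffixSet LB)
      = PySem.Set.ofList ((List.range LA.length).map (fun i => LA.drop i)
          ++ (List.range LB.length).map (fun j => LB.drop j)) := by
  unfold pvSuffixSet
  rw [PySem.Set.ofList_eq_foldl, PySem.Set.ofList_eq_foldl, PySem.Set.ofList_eq_foldl,
      List.foldl_append]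
  have h1 : PySem.Set.union
      (List.foldl PySem.Set.add [] ((List.range LA.length).map (fun i => LA.drop i)))
      (List.foldl PySem.Set.add [] ((List.range LB.length).map (fun j => LB.drop j)))
      = List.foldl PySem.Set.add
          (List.foldl PySem.Set.add [] ((List.range LA.length).map (fun i => LA.drop i)))
          (List.foldl PySem.Set.add [] ((List.range LB.length).map (fun j => LB.drop j))) := by
    rfl
  rw [h1]
  exact foldl_add_ofList _ [] _ (by intro x hx; simp at hx)

-- the rank dict built from enumerate(order) looks up the index in order
lemma get?_pvRankDict (order : List (List Char)) (hnd : order.Nodup) (x : List Char) :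
    (pvRankDict order).get? x = if x ∈ order then some ((order.idxOf x : Int)) else none := by
  unfold pvRankDict
  have main : ∀ (l : List (List Char)) (off : Int) (d : PySem.Dict (List Char) Int),
      l.Nodup →
      ((PySem.List.enumerate l off).foldl (fun d p => d.insert p.2 p.1) d).get? x
        = if x ∈ l then some (off + (l.idxOf x : Int)) else d.get? x := by
    intro l
    induction l with
    | nil => intro off d _; simp [PySem.List.enumerate]
    | cons y t ih =>
      intro off d hnd
      rw [show PySem.List.enumerate (y :: t) off = (off, y) :: PySem.List.enumerate t (off + 1) from rfl]
      simp only [List.foldl_cons]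
      rw [ih (off + 1) (d.insert y off) (List.Nodup.of_cons hnd)]
      by_cases hxy : x = y
      · subst hxy
        have hxt : x ∉ t := (List.nodup_cons.mp hnd).1
        simp [hxt, List.idxOf_cons_self, PySem.Dict.get?_insert_self]
      · by_cases hxt : x ∈ t
        · have hstep : List.idxOf x (y :: t) = (List.idxOf x t).succ :=
            List.idxOf_cons_ne t (fun h => hxy h.symm)
          simp only [hxt, if_true, List.mem_cons, hxy, false_or, hstep]
          congr 1
          push_cast
          omega
        · have hmem : x ∉ y :: t := by simp [hxy, hxt]
          simp [hxt, hmem, PySem.Dict.get?_insert_of_ne d off hxy]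
  simpa using main order 0 PySem.Dict.empty hnd

-- in a strictly <-sorted list, index order is element order
lemma idxOf_lt_idxOf_iff {l : List (List Char)} (hp : l.Pairwise (· < ·))
    {x y : List Char} (hx : x ∈ l) (hy : y ∈ l) :
    l.idxOf x < l.idxOf y ↔ x < y := by
  have hlx := List.idxOf_lt_length_of_mem hx
  have hly := List.idxOf_lt_length_of_mem hy
  have hpg := List.pairwise_iff_getElem.mp hp
  constructor
  · intro h
    have := hpg (l.idxOf x) (l.idxOf y) hlx hly h
    rwa [List.getElem_idxOf hlx, List.getElem_idxOf hly] at this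
  · intro hxy
    rcases Nat.lt_trichotomy (l.idxOf x) (l.idxOf y) with h | h | h
    · exact h
    · exfalso
      have hx' := List.getElem_idxOf hlx
      simp only [h] at hx'
      rw [List.getElem_idxOf hly] at hx'
      subst hx'
      exact lt_irrefl _ hxy
    · exfalso
      have := hpg (l.idxOf y) (l.idxOf x) hly hlx h
      rw [List.getElem_idxOf hlx, List.getElem_idxOf hly] at this
      exact lt_asymm hxy this

-- the two loops take the same branch at every step
lemma pvLoopA_eq_pvLoopB (LA LB : List Char) (ra rb : List Int)
    (hA : ∀ i, i < LA.length → ∀ j, j < LB.length →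
      (ra.getD i 0 < rb.getD j 0 ↔ LA.drop i < LB.drop j)) :
    ∀ (fuel i j : Nat) (acc : List Char),
      pvLoopA LA LB fuel i j acc = pvLoopB LA LB ra rb fuel i j acc := by
  intro fuel
  induction fuel with
  | zero => intro i j acc; rfl
  | succ f ih =>
    intro i j acc
    cases hia : LA[i]? with
    | none => simp [pvLoopA, pvLoopB, hia]
    | some ca =>
      cases hjb : LB[j]? with
      | none => simp [pvLoopA, pvLoopB, hia, hjb]
      | some cb =>
        have hi : i < LA.length := by
          by_contra hc
          simp [List.getElem?_eq_none (by omega : LA.length ≤ i)] at hia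
        have hj : j < LB.length := by
          by_contra hc
          simp [List.getElem?_eq_none (by omega : LB.length ≤ j)] at hjb
        have hAn : ra.getD i 0 < rb.getD j 0 ↔ LA.drop i < LB.drop j := hA i hi j hj
        simp only [List.getD] at hAn
        by_cases hlive : ca ≠ '~' ∨ cb ≠ '~'
        · by_cases hlt : LA.drop i < LB.drop j
          · by_cases hca : ca = '~'
            · have hcb : cb ≠ '~' := hlive.resolve_left (by simp [hca])
              rw [show pvLoopA LA LB (f+1) i j acc = pvLoopA LA LB f i (j+1) (acc ++ [cb]) by
                simp [pvLoopA, hia, hjb, hca, hcb]]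
              rw [show pvLoopB LA LB ra rb (f+1) i j acc = pvLoopB LA LB ra rb f i (j+1) (acc ++ [cb]) by
                simp [pvLoopB, hia, hjb, hca, hcb]]
              exact ih i (j+1) (acc ++ [cb])
            · rw [show pvLoopA LA LB (f+1) i j acc = pvLoopA LA LB f (i+1) j (acc ++ [ca]) by
                simp [pvLoopA, hia, hjb, hca, hlt]]
              rw [show pvLoopB LA LB ra rb (f+1) i j acc = pvLoopB LA LB ra rb f (i+1) j (acc ++ [ca]) by
                simp [pvLoopB, hia, hjb, hca, hAn, hlt]]
              exact ih (i+1) j (acc ++ [ca])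
          · rw [show pvLoopA LA LB (f+1) i j acc = pvLoopA LA LB f i (j+1) (acc ++ [cb]) by
              simp [pvLoopA, hia, hjb, hlive, hlt]]
            rw [show pvLoopB LA LB ra rb (f+1) i j acc = pvLoopB LA LB ra rb f i (j+1) (acc ++ [cb]) by
              simp [pvLoopB, hia, hjb, hlive, hAn, hlt]]
            exact ih i (j+1) (acc ++ [cb])
        · simp [pvLoopA, pvLoopB, hia, hjb, hlive]

-- the whole computation, on the sentinel-terminated character lists
lemma pvMain (LA LB : List Char) :
    pvLoopA LA LB (LA.length + LB.length) 0 0 []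
      = pvLoopB LA LB
          (pvRanks (pvRankDict (PySem.List.sorted (PySem.Set.union (pvSuffixSet LA) (pvSuffixSet LB)) (fun x => x) false)) LA)
          (pvRanks (pvRankDict (PySem.List.sorted (PySem.Set.union (pvSuffixSet LA) (pvSuffixSet LB)) (fun x => x) false)) LB)
          (LA.length + LB.length) 0 0 [] := by
  set order := PySem.List.sorted (PySem.Set.union (pvSuffixSet LA) (pvSuffixSet LB)) (fun x => x) false with horder
  have hofl : order = PySem.List.sorted (PySem.Set.ofList
      ((List.range LA.length).map (fun i => LA.drop i)
        ++ (List.range LB.length).map (fun j => LB.drop j))) (fun x => x) false := by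
    rw [horder, union_suffixSets]
  have hmemA : ∀ i, i < LA.length → LA.drop i ∈ order := by
    intro i hi
    rw [hofl, PySem.List.mem_sorted]
    exact (PySem.Set.mem_ofList _ _).mpr
      (List.mem_append.mpr (Or.inl (List.mem_map.mpr ⟨i, List.mem_range.mpr hi, rfl⟩)))
  have hmemB : ∀ j, j < LB.length → LB.drop j ∈ order := by
    intro j hj
    rw [hofl, PySem.List.mem_sorted]
    exact (PySem.Set.mem_ofList _ _).mpr
      (List.mem_append.mpr (Or.inr (List.mem_map.mpr ⟨j, List.mem_range.mpr hj, rfl⟩)))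
  have hnd : order.Nodup := by
    rw [hofl]
    exact ((PySem.List.sorted_perm _ _ _).nodup_iff).mpr (PySem.Set.nodup_ofList _)
  have hpw : order.Pairwise (· < ·) := by
    have hD : (fun a b => a.decidableLT b : DecidableRel (α := List Char) (· < ·))
        = (LinearOrder.toDecidableLT : DecidableRel (α := List Char) (· < ·)) := by
      funext a b; exact Subsingleton.elim _ _
    have h := PySem.List.sorted_ofList_pairwise_lt (κ := List Char)
      ((List.range LA.length).map (fun i => LA.drop i)
        ++ (List.range LB.length).map (fun j => LB.drop j))
    rw [← hD] at h
    rw [hofl]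
    exact h
  have hrank : ∀ (i : Nat), i < LA.length → ∀ (j : Nat), j < LB.length →
      ((pvRanks (pvRankDict order) LA).getD i 0 < (pvRanks (pvRankDict order) LB).getD j 0
        ↔ LA.drop i < LB.drop j) := by
    intro i hi j hj
    unfold pvRanks
    rw [PySem.List.getD_map_range _ _ _ _ hi, PySem.List.getD_map_range _ _ _ _ hj]
    rw [get?_pvRankDict order hnd (LA.drop i), get?_pvRankDict order hnd (LB.drop j)]
    rw [if_pos (hmemA i hi), if_pos (hmemB j hj)]
    simp only [Option.getD_some, Int.ofNat_lt]
    exact_mod_cast idxOf_lt_idxOf_iff hpw (hmemA i hi) (hmemB j hj)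
  exact pvLoopA_eq_pvLoopB LA LB _ _ hrank (LA.length + LB.length) 0 0 []

-- ===== VERDICT =====
theorem morganAndString_spec : Claim_equal_morganAndString := by
  intro a b _hDom
  unfold Spec_morganAndString morganAndString morganAndString_alt
  exact congrArg String.ofList (pvMain (a.toList ++ ['~']) (b.toList ++ ['~']))
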